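-- pv_equiv track=rewrite | github.com/ren-hq123/dji-gps-ms-extractor | parse_djmd_gps.py | build_pts_ms
-- ===== SOURCE A (Python) =====
-- def build_pts_ms(sizes, timescale, stts_entries):
--     """根据 stts 展开每个 sample 的 duration，得到每个 sample 的 PTS（毫秒）。"""
--     # 展开 stts: 每个 (count, delta) 表示 count 个 sample，每个 duration = delta
--     durations = []
--     for count, delta in stts_entries:
--         durations.extend([delta] * count)
--     # 若 duration 数量与 sizes 不一致，按 sizes 长度截断或用最后一个 delta 填充
--     if len(durations) < len(sizes):
--         last_delta = durations[-1] if durations else 0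
--         durations.extend([last_delta] * (len(sizes) - len(durations)))
--     elif len(durations) > len(sizes):
--         durations = durations[: len(sizes)]
--     pts_ticks = 0
--     pts_ms_list = []
--     for d in durations:
--         pts_ms_list.append(pts_ticks * 1000 // timescale)
--         pts_ticks += d
--     return pts_ms_list
-- ===== SOURCE B (Python) =====
-- def build_pts_ms(sizes, timescale, stts_entries):
--     """Single pass over stts_entries with a running tick counter; no intermediate
--     durations list is ever built."""
--     n = len(sizes)
--     pts_ms_list = []
--     pts_ticks = 0
--     last_delta = 0
--     for count, delta in stts_entries:
--         if count > 0:
--             last_delta = delta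
--         k = min(count, n - len(pts_ms_list))
--         for _ in range(k):
--             pts_ms_list.append(pts_ticks * 1000 // timescale)
--             pts_ticks += delta
--     while len(pts_ms_list) < n:
--         pts_ms_list.append(pts_ticks * 1000 // timescale)
--         pts_ticks += last_delta
--     return pts_ms_list
-- ===== Notes on version B (the rewrite author's own statement) =====
-- stated objective: alternative
-- what changed: B streams over stts_entries directly with a running tick counter and a last-delta register, truncating/padding on the fly, instead of materialising the fully expanded durations list and then truncating/padding/scanning it.
import Mathlib
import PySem

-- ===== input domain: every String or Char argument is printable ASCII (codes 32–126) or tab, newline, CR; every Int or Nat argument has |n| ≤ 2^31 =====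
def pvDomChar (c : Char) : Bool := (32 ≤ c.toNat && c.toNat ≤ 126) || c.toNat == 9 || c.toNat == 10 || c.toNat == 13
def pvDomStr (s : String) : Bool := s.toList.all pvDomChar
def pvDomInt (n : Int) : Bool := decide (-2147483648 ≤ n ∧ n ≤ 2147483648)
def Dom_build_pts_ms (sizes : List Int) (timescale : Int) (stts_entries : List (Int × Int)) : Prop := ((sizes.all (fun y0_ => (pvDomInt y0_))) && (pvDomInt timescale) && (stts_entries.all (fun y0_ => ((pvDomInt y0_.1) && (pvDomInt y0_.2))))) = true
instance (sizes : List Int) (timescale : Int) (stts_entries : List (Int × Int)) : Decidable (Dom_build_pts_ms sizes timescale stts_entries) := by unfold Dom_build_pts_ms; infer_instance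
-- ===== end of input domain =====

-- B fuses expansion/truncation/padding/scanning into one streaming pass over stts_entries, never building the intermediate durations list (alternative decomposition).

-- ===== PORT A =====
def build_pts_ms (sizes : List Int) (timescale : Int) (stts_entries : List (Int × Int)) : List Int :=
  -- durations = []; for count, delta in stts_entries: durations.extend([delta] * count)
  let durations : List Int :=
    stts_entries.foldl (fun acc cd => acc ++ List.replicate cd.1.toNat cd.2) []
  -- truncate or pad to len(sizes)
  let durations : List Int :=
    if durations.length < sizes.length then
      let last_delta : Int := durations.getLastD 0   -- durations[-1] if durations else 0
      durations ++ List.replicate (sizes.length - durations.length) last_delta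
    else if durations.length > sizes.length then
      durations.take sizes.length
    else durations
  -- pts loop
  let res : Int × List Int :=
    durations.foldl (fun st d =>
      (st.1 + d, st.2 ++ [PySem.Int.floordiv (st.1 * 1000) timescale])) (0, [])
  res.2

-- ===== PORT B =====
-- inner 'for _ in range(k)' emission loop of B: emits k samples, returns (samples, new ticks)
def pvEmit (timescale : Int) (k : Nat) (ticks delta : Int) : List Int × Int :=
  match k with
  | 0 => ([], ticks)
  | Nat.succ k' =>
    let v := PySem.Int.floordiv (ticks * 1000) timescale
    let r := pvEmit timescale k' (ticks + delta) delta
    (v :: r.1, r.2)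

def build_pts_ms_alt (sizes : List Int) (timescale : Int) (stts_entries : List (Int × Int)) : List Int :=
  let n := sizes.length
  -- main streaming loop over stts_entries with state (pts_ms_list, pts_ticks, last_delta)
  let st : List Int × Int × Int :=
    stts_entries.foldl (fun st cd =>
      let last_delta : Int := if cd.1 > 0 then cd.2 else st.2.2
      let k : Int := min cd.1 ((n : Int) - st.1.length)
      let r := pvEmit timescale k.toNat st.2.1 cd.2
      (st.1 ++ r.1, r.2, last_delta)) ([], 0, 0)
  -- padding while-loop
  let pad := pvEmit timescale (n - st.1.length) st.2.1 st.2.2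
  st.1 ++ pad.1

-- ===== PRECONDITION & SPEC =====
-- Pre_ excludes exactly the ZeroDivisionError: timescale = 0 raises in both programs
-- unless sizes is empty (then no division is ever performed).
def Pre_build_pts_ms (sizes : List Int) (timescale : Int) (stts_entries : List (Int × Int)) : Prop :=
  timescale ≠ 0 ∨ sizes = []
instance (sizes : List Int) (timescale : Int) (stts_entries : List (Int × Int)) : Decidable (Pre_build_pts_ms sizes timescale stts_entries) := by unfold Pre_build_pts_ms; infer_instance

def pvWitness_build_pts_ms : List Int × Int × (List (Int × Int)) := ([10, 20, 30, 40], 1000, [(2, 500), (1, 250)])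

def Spec_build_pts_ms (sizes : List Int) (timescale : Int) (stts_entries : List (Int × Int)) (out : List Int) : Prop := out = build_pts_ms_alt sizes timescale stts_entries
instance (sizes : List Int) (timescale : Int) (stts_entries : List (Int × Int)) (out : List Int) : Decidable (Spec_build_pts_ms sizes timescale stts_entries out) := by unfold Spec_build_pts_ms; infer_instance

-- ===== CLAIM (what is proved, stated in full; the proofs are below) =====
def Claim_equal_build_pts_ms : Prop := ∀ (sizes : List Int) (timescale : Int) (stts_entries : List (Int × Int)), Dom_build_pts_ms sizes timescale stts_entries → Pre_build_pts_ms sizes timescale stts_entries → Spec_build_pts_ms sizes timescale stts_entries (build_pts_ms sizes timescale stts_entries)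

-- ===== LEMMAS AND PROOFS =====

-- reference scan: per-duration PTS values starting from tick t
def pvScan (timescale : Int) : List Int → Int → List Int
  | [], _ => []
  | d :: ds, t => PySem.Int.floordiv (t * 1000) timescale :: pvScan timescale ds (t + d)

lemma pvScan_append (timescale : Int) (xs ys : List Int) (t : Int) :
    pvScan timescale (xs ++ ys) t = pvScan timescale xs t ++ pvScan timescale ys (t + xs.sum) := by
  induction xs generalizing t with
  | nil => simp [pvScan]
  | cons x xs ih => simp [pvScan, ih, add_assoc]

lemma pvEmit_eq_scan (timescale : Int) (k : Nat) (t d : Int) :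
    pvEmit timescale k t d = (pvScan timescale (List.replicate k d) t, t + k * d) := by
  induction k generalizing t with
  | zero => simp [pvEmit, pvScan]
  | succ k ih =>
    simp only [pvEmit, ih, List.replicate_succ, pvScan]
    congr 1
    push_cast; ring

lemma foldlA_eq_scan (timescale : Int) (ds : List Int) (t : Int) (acc : List Int) :
    ds.foldl (fun (st : Int × List Int) d =>
      (st.1 + d, st.2 ++ [PySem.Int.floordiv (st.1 * 1000) timescale])) (t, acc)
    = (t + ds.sum, acc ++ pvScan timescale ds t) := by
  induction ds generalizing t acc with
  | nil => simp [pvScan]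
  | cons d ds ih => simp [List.foldl_cons, ih, pvScan, add_assoc]

-- the expanded durations list of A
def pvExpand (es : List (Int × Int)) : List Int :=
  es.foldl (fun acc cd => acc ++ List.replicate cd.1.toNat cd.2) []

lemma pvExpand_acc (es : List (Int × Int)) (acc : List Int) :
    es.foldl (fun acc cd => acc ++ List.replicate cd.1.toNat cd.2) acc
      = acc ++ pvExpand es := by
  induction es generalizing acc with
  | nil => simp [pvExpand]
  | cons e es ih =>
    rw [List.foldl_cons, ih]
    have h2 : pvExpand (e :: es) = List.replicate e.1.toNat e.2 ++ pvExpand es := by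
      show List.foldl (fun acc cd => acc ++ List.replicate cd.1.toNat cd.2)
        ([] ++ List.replicate e.1.toNat e.2) es = _
      rw [ih, List.nil_append]
    rw [h2, List.append_assoc]

lemma pvExpand_cons_eq (e : Int × Int) (es : List (Int × Int)) :
    pvExpand (e :: es) = List.replicate e.1.toNat e.2 ++ pvExpand es := by
  show List.foldl (fun acc cd => acc ++ List.replicate cd.1.toNat cd.2)
    ([] ++ List.replicate e.1.toNat e.2) es = _
  rw [pvExpand_acc, List.nil_append]

lemma pvScan_length (timescale : Int) (ds : List Int) (t : Int) :
    (pvScan timescale ds t).length = ds.length := by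
  induction ds generalizing t with
  | nil => simp [pvScan]
  | cons d ds ih => simp [pvScan, ih]

-- last delta bookkeeping: fold of B's last_delta update
def pvLast (es : List (Int × Int)) (l : Int) : Int :=
  es.foldl (fun l cd => if cd.1 > 0 then cd.2 else l) l

lemma getLastD_append (xs ys : List Int) (l : Int) :
    (xs ++ ys).getLastD l = ys.getLastD (xs.getLastD l) := by
  cases ys with
  | nil => simp
  | cons y ys => simp [List.getLastD_eq_getLast?]

lemma getLastD_expand (es : List (Int × Int)) (l : Int) :
    (pvExpand es).getLastD l = pvLast es l := by
  induction es generalizing l with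
  | nil => simp [pvExpand, pvLast]
  | cons e es ih =>
    rw [pvExpand_cons_eq, getLastD_append]
    have h2 : (List.replicate e.1.toNat e.2).getLastD l = if e.1 > 0 then e.2 else l := by
      rcases Nat.eq_zero_or_pos e.1.toNat with h | h
      · simp [h]
        have : ¬ (e.1 > 0) := by omega
        simp [this]
      · have : e.1 > 0 := by omega
        simp [this]
        cases hk : e.1.toNat with
        | zero => omega
        | succ k => simp [List.replicate_succ']
    rw [h2, ih, pvLast, pvLast]
    simp only [List.foldl_cons]

-- B's main loop invariant
lemma loopB_invariant (timescale : Int) (n : Nat) (es : List (Int × Int)) :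
    ∀ (acc : List Int) (t l : Int), acc.length ≤ n →
    es.foldl (fun st cd =>
      let last_delta : Int := if cd.1 > 0 then cd.2 else st.2.2
      let k : Int := min cd.1 ((n : Int) - st.1.length)
      let r := pvEmit timescale k.toNat st.2.1 cd.2
      (st.1 ++ r.1, r.2, last_delta)) (acc, t, l)
    = (acc ++ pvScan timescale ((pvExpand es).take (n - acc.length)) t,
       t + ((pvExpand es).take (n - acc.length)).sum,
       pvLast es l) := by
  induction es with
  | nil => intro acc t l h; simp [pvExpand, pvLast, pvScan]
  | cons e es ih =>
    intro acc t l h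
    simp only [List.foldl_cons]
    have hexp := pvExpand_cons_eq e es
    set k : Int := min e.1 ((n : Int) - acc.length) with hk
    have hkt : k.toNat = min e.1.toNat (n - acc.length) := by omega
    rw [pvEmit_eq_scan]
    dsimp only
    have hlen : (acc ++ pvScan timescale (List.replicate k.toNat e.2) t).length
        = acc.length + k.toNat := by
      simp [pvScan_length]
    rw [ih _ _ _ (by omega)]
    rw [hexp]
    have htake : (List.replicate e.1.toNat e.2 ++ pvExpand es).take (n - acc.length)
        = List.replicate k.toNat e.2 ++ (pvExpand es).take (n - (acc.length + k.toNat)) := by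
      rw [List.take_append]
      congr 1
      · rw [List.take_replicate]; congr 1; omega
      · congr 1; simp; omega
    rw [htake, hlen, pvScan_append, List.sum_append]
    have hsumrep : (List.replicate k.toNat e.2).sum = (k.toNat : Int) * e.2 := by
      simp [List.sum_replicate]
    simp only [Prod.mk.injEq]
    refine ⟨?_, ?_, ?_⟩
    · rw [hsumrep, List.append_assoc]
    · rw [hsumrep]; ring
    · simp [pvLast]

-- ===== VERDICT (by name: the statement is the Claim_ definition above) =====
theorem build_pts_ms_spec : Claim_equal_build_pts_ms := by
  intro sizes timescale es _ _
  unfold Spec_build_pts_ms build_pts_ms build_pts_ms_alt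
  simp only []
  rw [show (es.foldl (fun acc cd => acc ++ List.replicate cd.1.toNat cd.2) [] : List Int)
        = pvExpand es from rfl]
  rw [loopB_invariant timescale sizes.length es [] 0 0 (by simp)]
  simp only [List.length_nil, Nat.sub_zero, List.nil_append]
  set E := pvExpand es with hE
  set n := sizes.length with hn
  by_cases hlt : E.length < n
  · -- pad case
    rw [if_pos hlt]
    rw [foldlA_eq_scan]
    have htE : E.take n = E := List.take_of_length_le (by omega)
    rw [htE]
    have hlen2 : (pvScan timescale E 0).length = E.length := pvScan_length _ _ _
    rw [pvScan_append]
    simp only [hlen2]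
    rw [pvEmit_eq_scan]
    simp only [zero_add]
    rw [getLastD_expand, List.nil_append]
  · rw [if_neg hlt]
    by_cases hgt : E.length > n
    · rw [if_pos hgt, foldlA_eq_scan]
      have : n - (E.take n).length = 0 := by simp; omega
      rw [pvEmit_eq_scan]
      have hlenS : (pvScan timescale (E.take n) 0).length = n := by
        rw [pvScan_length]; simp; omega
      simp [hlenS, pvScan]
    · have heq : E.length = n := by omega
      rw [if_neg (by omega), foldlA_eq_scan]
      have htE : E.take n = E := List.take_of_length_le (by omega)
      rw [htE, pvEmit_eq_scan]
      have hlenS : (pvScan timescale E 0).length = n := by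
        rw [pvScan_length]; omega
      simp [hlenS, pvScan]
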